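-- pv_equiv track=rewrite | github.com/huy-hng/spot_that_fi | src/helpers/helpers.py | lookahead
-- ===== SOURCE A (Python) =====
-- from typing import Iterable, TypeVar, NamedTuple
--
-- T = TypeVar('T')
--
-- def lookahead(iterable: Iterable[T]):
-- 	it = iter(iterable)
-- 	try:
-- 		last = next(it)
-- 	except StopIteration:
-- 		return
--
-- 	else:
-- 		for val in it:
-- 			yield last, True
-- 			last = val
-- 		yield last, False
-- ===== SOURCE B (Python) =====
-- def lookahead(iterable):
-- 	items = list(iterable)
-- 	for i, val in enumerate(items):
-- 		yield val, i < len(items) - 1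
-- ===== Notes on version B (the rewrite author's own statement) =====
-- stated objective: simpler
-- what changed: Replaces the primed next()/buffered-lag streaming loop with materializing the input and an indexed enumerate pass that compares i against len-1.
import Mathlib
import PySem

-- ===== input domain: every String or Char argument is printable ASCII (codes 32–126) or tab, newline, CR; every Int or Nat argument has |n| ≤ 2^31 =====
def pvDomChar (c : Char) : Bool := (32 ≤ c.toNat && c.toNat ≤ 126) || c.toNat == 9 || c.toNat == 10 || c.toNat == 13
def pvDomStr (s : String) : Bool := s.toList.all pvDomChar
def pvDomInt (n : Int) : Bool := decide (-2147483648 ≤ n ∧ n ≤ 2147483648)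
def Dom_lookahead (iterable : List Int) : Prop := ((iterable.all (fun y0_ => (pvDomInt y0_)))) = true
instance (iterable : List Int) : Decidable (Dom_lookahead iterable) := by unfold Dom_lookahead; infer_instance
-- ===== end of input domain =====

-- B materializes the input and yields each element with an index-vs-length flag via enumerate, replacing A's primed next()/buffered-lag streaming loop (objective: simpler; return-value equivalence only — A is a lazy generator, B consumes the iterable up front).
-- ===== PORT A =====
-- for val in it: yield (last, True); last = val; then yield (last, False)
def lookaheadLoop (last : Int) (rest : List Int) : List (Int × Bool) :=
  match rest with
  | [] => [(last, false)]
  | val :: vs => (last, true) :: lookaheadLoop val vs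

def lookahead (iterable : List Int) : List (Int × Bool) :=
  match iterable with
  | [] => []
  | last :: it => lookaheadLoop last it

-- ===== PORT B =====
-- enumerate(items), yielding (val, i < len(items) - 1)
def lookahead_alt (iterable : List Int) : List (Int × Bool) :=
  (PySem.List.enumerate iterable 0).map
    (fun p => (p.2, decide (p.1 < (iterable.length : Int) - 1)))

-- ===== PRECONDITION & SPEC =====
def Spec_lookahead (iterable : List Int) (out : List (Int × Bool)) : Prop := out = lookahead_alt iterable
instance (iterable : List Int) (out : List (Int × Bool)) : Decidable (Spec_lookahead iterable out) := by unfold Spec_lookahead; infer_instance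

-- ===== CLAIM (what is proved, stated in full; the proofs are below) =====
def Claim_equal_lookahead : Prop := ∀ (iterable : List Int), Dom_lookahead iterable → Spec_lookahead iterable (lookahead iterable)

-- ===== LEMMAS AND PROOFS =====

lemma lookaheadLoop_eq (x : Int) (xs : List Int) (k : Int) :
    lookaheadLoop x xs =
      (PySem.List.enumerate (x :: xs) k).map
        (fun p => (p.2, decide (p.1 < k + (xs.length : Int)))) := by
  induction xs generalizing x k with
  | nil => simp [lookaheadLoop, PySem.List.enumerate_cons, PySem.List.enumerate_nil]
  | cons y ys ih =>
      rw [lookaheadLoop, PySem.List.enumerate_cons, List.map, ih y (k + 1)]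
      refine List.cons_eq_cons.mpr ⟨?_, ?_⟩
      · simp
      · apply List.map_congr_left
        intro p _
        simp only [List.length_cons, Prod.mk.injEq, decide_eq_decide, true_and]
        push_cast; omega

-- ===== VERDICT (by name: the statement is the Claim_ definition above) =====
theorem lookahead_spec : Claim_equal_lookahead := by
  intro iterable _
  unfold Spec_lookahead
  cases iterable with
  | nil => rfl
  | cons x xs =>
      show lookaheadLoop x xs = _
      unfold lookahead_alt
      rw [lookaheadLoop_eq x xs 0]
      apply List.map_congr_left
      intro p _
      simp only [List.length_cons, Prod.mk.injEq, decide_eq_decide, true_and]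
      push_cast; omega
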